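-- pv_equiv track=rewrite | github.com/natcz/scrabble | Hint.py | similarLetters
-- ===== SOURCE A (Python) =====
-- from collections import defaultdict as dd
--
-- def similarLetters(word1, word2): #checking how many common letters two words have
--     w1 = dd(lambda: 0)
--     w2 = dd(lambda: 0)
--     counter = 0                        #creating a deafault dict for each word where
--     for letter in word1:               #key: letter val: number of instances of letters
--         w1[letter] += 1
--     for letter in word2:
--         w2[letter] += 1
--     for key, val in w1.items():        #counting how many letters are the same in word1 and word2
--         counter += min(val, w2[key])
--     return counter                     #returning int value
-- ===== SOURCE B (Python) =====
-- def similarLetters(word1, word2):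
--     remaining = {}
--     for ch in word1:
--         remaining[ch] = remaining.get(ch, 0) + 1
--     counter = 0
--     for ch in word2:
--         if remaining.get(ch, 0) > 0:
--             counter += 1
--             remaining[ch] -= 1
--     return counter
-- ===== Notes on version B (the rewrite author's own statement) =====
-- stated objective: alternative
-- what changed: Instead of building a count table for each word and summing min(val1, val2) over word1's distinct letters, B builds one count table from word1 and consumes it in a single scan of word2, counting each character whose remaining count is positive.
import Mathlib
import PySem

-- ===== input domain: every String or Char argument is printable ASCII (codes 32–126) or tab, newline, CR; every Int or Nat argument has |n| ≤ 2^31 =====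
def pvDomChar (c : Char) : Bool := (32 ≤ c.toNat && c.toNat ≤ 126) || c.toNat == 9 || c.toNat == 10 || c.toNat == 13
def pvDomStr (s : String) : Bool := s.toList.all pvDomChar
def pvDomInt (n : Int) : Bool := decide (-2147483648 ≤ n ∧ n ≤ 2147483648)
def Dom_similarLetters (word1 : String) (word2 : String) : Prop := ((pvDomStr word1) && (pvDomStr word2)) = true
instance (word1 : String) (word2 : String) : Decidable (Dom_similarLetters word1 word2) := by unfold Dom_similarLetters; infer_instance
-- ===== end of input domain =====

-- B re-implements A by consuming a single count table of word1 during one scan of word2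
-- (alternative decomposition, same asymptotic cost).

-- ===== PORT A =====
-- counting loops 'w[letter] += 1' on a defaultdict(int) are d.modify letter 0 (· + 1);
-- 'w2[key]' on the defaultdict inserts a 0 for a missing key, but w2 is never read after
-- this loop and the value read is exactly getD key 0, so the port reads getD — value-exact.
def similarLetters (word1 : String) (word2 : String) : Int :=
  let w1 : PySem.Dict Char Int :=
    word1.toList.foldl (fun d letter => d.modify letter 0 (· + 1)) PySem.Dict.empty
  let w2 : PySem.Dict Char Int :=
    word2.toList.foldl (fun d letter => d.modify letter 0 (· + 1)) PySem.Dict.empty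
  w1.items.foldl (fun counter kv => counter + min kv.2 (w2.getD kv.1 0)) 0

-- ===== PORT B =====
def similarLetters_alt (word1 : String) (word2 : String) : Int :=
  let remaining : PySem.Dict Char Int :=
    word1.toList.foldl (fun d ch => d.insert ch (d.getD ch 0 + 1)) PySem.Dict.empty
  (word2.toList.foldl
    (fun (s : PySem.Dict Char Int × Int) ch =>
      if s.1.getD ch 0 > 0 then (s.1.insert ch (s.1.getD ch 0 - 1), s.2 + 1) else s)
    (remaining, 0)).2

-- ===== PRECONDITION & SPEC =====
def Spec_similarLetters (word1 : String) (word2 : String) (out : Int) : Prop := out = similarLetters_alt word1 word2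
instance (word1 : String) (word2 : String) (out : Int) : Decidable (Spec_similarLetters word1 word2 out) := by unfold Spec_similarLetters; infer_instance

-- ===== CLAIM (what is proved, stated in full; the proofs are below) =====
def Claim_equal_similarLetters : Prop := ∀ (word1 : String) (word2 : String), Dom_similarLetters word1 word2 → Spec_similarLetters word1 word2 (similarLetters word1 word2)

-- ===== LEMMAS AND PROOFS =====

-- B's consuming scan, with any dict of nonnegative remaining counts:
-- the counter gain is the sum over the distinct letters of the scanned list
-- of min(remaining, occurrences).
theorem pv_scan_eq_sum (l : List Char) : ∀ (d : PySem.Dict Char Int) (acc : Int),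
    (∀ c, 0 ≤ d.getD c 0) →
    (l.foldl
      (fun (s : PySem.Dict Char Int × Int) ch =>
        if s.1.getD ch 0 > 0 then (s.1.insert ch (s.1.getD ch 0 - 1), s.2 + 1) else s)
      (d, acc)).2
      = acc + ∑ x ∈ l.toFinset, min (d.getD x 0) (l.count x : Int) := by
  induction l with
  | nil => simp
  | cons c t ih =>
    intro d acc hd
    simp only [List.foldl_cons]
    by_cases hpos : d.getD c 0 > 0
    · rw [if_pos hpos]
      have hd' : ∀ x, 0 ≤ (d.insert c (d.getD c 0 - 1)).getD x 0 := by
        intro x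
        rw [PySem.Dict.getD_insert]
        split_ifs with hx
        · omega
        · exact hd x
      rw [ih _ _ hd']
      by_cases hct : c ∈ t
      · have hfin : (c :: t).toFinset = t.toFinset := by
          simp [List.toFinset_cons, hct]
        have hcmem : c ∈ t.toFinset := List.mem_toFinset.mpr hct
        rw [hfin, ← Finset.add_sum_erase _ _ hcmem, ← Finset.add_sum_erase _ _ hcmem]
        have hterm : min (d.getD c 0) ((c :: t).count c : Int)
            = 1 + min ((d.insert c (d.getD c 0 - 1)).getD c 0) (t.count c : Int) := by
          rw [PySem.Dict.getD_insert_self]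
          simp only [List.count_cons_self]
          push_cast
          omega
        have hrest : ∑ x ∈ t.toFinset.erase c, min (d.getD x 0) ((c :: t).count x : Int)
            = ∑ x ∈ t.toFinset.erase c,
                min ((d.insert c (d.getD c 0 - 1)).getD x 0) (t.count x : Int) := by
          refine Finset.sum_congr rfl fun x hx => ?_
          have hxc : x ≠ c := (Finset.mem_erase.mp hx).1
          rw [PySem.Dict.getD_insert, if_neg hxc, List.count_cons_of_ne (Ne.symm hxc)]
        rw [hterm, hrest]; ring
      · have hcf : c ∉ t.toFinset := fun h => hct (List.mem_toFinset.mp h)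
        rw [List.toFinset_cons, Finset.sum_insert hcf]
        have hterm : min (d.getD c 0) ((c :: t).count c : Int) = 1 := by
          simp only [List.count_cons_self, List.count_eq_zero_of_not_mem hct]
          push_cast
          omega
        have hrest : ∑ x ∈ t.toFinset, min (d.getD x 0) ((c :: t).count x : Int)
            = ∑ x ∈ t.toFinset,
                min ((d.insert c (d.getD c 0 - 1)).getD x 0) (t.count x : Int) := by
          refine Finset.sum_congr rfl fun x hx => ?_
          have hxc : x ≠ c := fun h => hcf (h ▸ hx)
          rw [PySem.Dict.getD_insert, if_neg hxc, List.count_cons_of_ne (Ne.symm hxc)]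
        rw [hterm, hrest]; ring
    · rw [if_neg hpos]
      rw [ih _ _ hd]
      have hzero : d.getD c 0 = 0 := le_antisymm (not_lt.mp hpos) (hd c)
      by_cases hct : c ∈ t
      · have hfin : (c :: t).toFinset = t.toFinset := by
          simp [List.toFinset_cons, hct]
        rw [hfin]
        congr 1
        refine Finset.sum_congr rfl fun x hx => ?_
        by_cases hxc : x = c
        · subst hxc
          simp only [hzero, List.count_cons_self]
          have : (0 : Int) ≤ (t.count x : Int) := Int.natCast_nonneg _
          omega
        · rw [List.count_cons_of_ne (Ne.symm hxc)]
      · have hcf : c ∉ t.toFinset := fun h => hct (List.mem_toFinset.mp h)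
        rw [List.toFinset_cons, Finset.sum_insert hcf]
        have hterm : min (d.getD c 0) ((c :: t).count c : Int) = 0 := by
          simp only [hzero, List.count_cons_self, List.count_eq_zero_of_not_mem hct]
          omega
        have hrest : ∑ x ∈ t.toFinset, min (d.getD x 0) ((c :: t).count x : Int)
            = ∑ x ∈ t.toFinset, min (d.getD x 0) (t.count x : Int) := by
          refine Finset.sum_congr rfl fun x hx => ?_
          have hxc : x ≠ c := fun h => hcf (h ▸ hx)
          rw [List.count_cons_of_ne (Ne.symm hxc)]
        rw [hterm, hrest]; ring

-- summing f over a nodup list whose members are exactly those of l equals the Finset sum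
theorem pv_sum_ofList_eq_sum_toFinset (l : List Char) (f : Char → Int) :
    ((PySem.Set.ofList l).map f).sum = ∑ x ∈ l.toFinset, f x := by
  rw [← List.sum_toFinset f (PySem.Set.nodup_ofList l)]
  refine Finset.sum_congr (Finset.ext fun x => ?_) (fun _ _ => rfl)
  simp [List.mem_toFinset, PySem.Set.mem_ofList]

-- a sum of mins of counts may be taken over either word's distinct letters
theorem pv_sum_switch (l1 l2 : List Char) :
    ∑ x ∈ l1.toFinset, min (l1.count x : Int) (l2.count x : Int)
      = ∑ x ∈ l2.toFinset, min (l1.count x : Int) (l2.count x : Int) := by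
  have h1 : ∑ x ∈ l1.toFinset, min (l1.count x : Int) (l2.count x : Int)
      = ∑ x ∈ l1.toFinset ∪ l2.toFinset, min (l1.count x : Int) (l2.count x : Int) := by
    refine Finset.sum_subset Finset.subset_union_left fun x _ hx => ?_
    have : l1.count x = 0 := List.count_eq_zero_of_not_mem (fun h => hx (List.mem_toFinset.mpr h))
    have h2 : (0 : Int) ≤ (l2.count x : Int) := Int.natCast_nonneg _
    omega
  have h2 : ∑ x ∈ l2.toFinset, min (l1.count x : Int) (l2.count x : Int)
      = ∑ x ∈ l1.toFinset ∪ l2.toFinset, min (l1.count x : Int) (l2.count x : Int) := by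
    refine Finset.sum_subset Finset.subset_union_right fun x _ hx => ?_
    have : l2.count x = 0 := List.count_eq_zero_of_not_mem (fun h => hx (List.mem_toFinset.mpr h))
    have h1 : (0 : Int) ≤ (l1.count x : Int) := Int.natCast_nonneg _
    omega
  rw [h1, h2]

-- ===== VERDICT (by name: the statement is the Claim_ definition above) =====
theorem similarLetters_spec : Claim_equal_similarLetters := by
  intro word1 word2 _
  unfold Spec_similarLetters similarLetters similarLetters_alt
  have hB : word1.toList.foldl (fun d ch => d.insert ch (d.getD ch 0 + 1)) PySem.Dict.empty
      = PySem.Dict.counter word1.toList :=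
    PySem.Dict.foldl_insert_getD_add_one_eq_counter word1.toList
  have hA1 : word1.toList.foldl (fun d letter => d.modify letter 0 (· + 1)) PySem.Dict.empty
      = PySem.Dict.counter word1.toList := rfl
  have hA2 : word2.toList.foldl (fun d letter => d.modify letter 0 (· + 1)) PySem.Dict.empty
      = PySem.Dict.counter word2.toList := rfl
  simp only [hA1, hA2, hB]
  rw [pv_scan_eq_sum word2.toList (PySem.Dict.counter word1.toList) 0
        (fun c => by rw [PySem.Dict.getD_counter]; exact Int.natCast_nonneg _)]
  rw [PySem.Dict.items_counter, List.foldl_map,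
      PySem.List.foldl_add (g := fun k => min ((word1.toList.count k : Int))
        ((PySem.Dict.counter word2.toList).getD k 0))]
  simp only [PySem.Dict.getD_counter]
  rw [pv_sum_ofList_eq_sum_toFinset word1.toList
        (fun k => min ((word1.toList.count k : Int)) ((word2.toList.count k : Int)))]
  rw [pv_sum_switch word1.toList word2.toList]
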